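-- pv_equiv track=rewrite | github.com/wsmorgan/phonon-enumeration | src/radix_num_generator2.py | idnum
-- ===== SOURCE A (Python) =====
-- def idnum(Coefficients,X):
-- #Change variable names for convience
-- 	idh = 0
-- 	for i in range(len(X)-1,-1,-1):
-- #perfrom computation on elements for both arrays such that
-- #X1+C1(X2+C2(X3+C3(X4.....))) is computed
-- 		if i == len(X):
-- 			idh = X[i]*Coefficients[i-1]
-- 		elif i == 0:
-- 			idh += X[i]
-- 		else:
-- 			idh += X[i]
-- 			idh *= Coefficients[i-1]
-- 	return(idh)
-- ===== SOURCE B (Python) =====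
-- def idnum(Coefficients, X):
--     # Forward traversal with an explicit positional weight (running product of
--     # coefficients) instead of A's backward Horner folding.
--     total = 0
--     weight = 1
--     for k in range(len(X)):
--         total += X[k] * weight
--         if k < len(X) - 1:
--             weight *= Coefficients[k]
--     return total
-- ===== Notes on version B (the rewrite author's own statement) =====
-- stated objective: alternative
-- what changed: Replaces A's backward Horner fold (high-to-low index loop folding the accumulator) with a forward low-to-high pass that maintains an explicit positional weight (running product of coefficients) and accumulates X[k]*weight.
import Mathlib
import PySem

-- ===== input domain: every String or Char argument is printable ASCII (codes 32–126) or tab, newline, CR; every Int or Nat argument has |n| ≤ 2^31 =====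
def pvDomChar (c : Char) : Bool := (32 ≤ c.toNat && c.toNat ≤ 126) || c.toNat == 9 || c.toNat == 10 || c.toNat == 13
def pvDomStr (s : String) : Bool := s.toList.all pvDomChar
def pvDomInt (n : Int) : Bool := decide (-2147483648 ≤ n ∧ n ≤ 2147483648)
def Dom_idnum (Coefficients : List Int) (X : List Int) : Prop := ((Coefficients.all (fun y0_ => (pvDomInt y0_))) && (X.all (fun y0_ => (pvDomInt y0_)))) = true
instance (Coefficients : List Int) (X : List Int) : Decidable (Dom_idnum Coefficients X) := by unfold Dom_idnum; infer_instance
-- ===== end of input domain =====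

-- B replaces A's backward Horner fold with a forward pass keeping an explicit
-- positional weight (running product of coefficients); same cost, different strategy.


-- ===== PORT A =====
def idnum (Coefficients : List Int) (X : List Int) : Int :=
  (PySem.List.pyRange ((X.length : Int) - 1) (-1) (-1)).foldl
    (fun idh i =>
      if i = (X.length : Int) then
        (PySem.List.pyGetD X i 0) * (PySem.List.pyGetD Coefficients (i - 1) 0)
      else if i = 0 then idh + PySem.List.pyGetD X i 0
      else (idh + PySem.List.pyGetD X i 0) * PySem.List.pyGetD Coefficients (i - 1) 0)
    0

-- ===== PORT B =====
def idnum_alt (Coefficients : List Int) (X : List Int) : Int :=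
  ((PySem.List.pyRange 0 (X.length : Int) 1).foldl
    (fun tw k =>
      ( tw.1 + PySem.List.pyGetD X k 0 * tw.2,
        if k < (X.length : Int) - 1 then tw.2 * PySem.List.pyGetD Coefficients k 0
        else tw.2 ))
    (0, 1)).1

-- ===== PRECONDITION & SPEC =====
-- Pre_ excludes exactly the inputs on which both programs raise IndexError:
-- fewer than len(X)-1 coefficients.
def Pre_idnum (Coefficients : List Int) (X : List Int) : Prop :=
  X.length ≤ Coefficients.length + 1
instance (Coefficients : List Int) (X : List Int) : Decidable (Pre_idnum Coefficients X) := by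
  unfold Pre_idnum; infer_instance

def pvWitness_idnum : List Int × List Int := ([2, 3], [1, 0, 1])

def Spec_idnum (Coefficients : List Int) (X : List Int) (out : Int) : Prop := out = idnum_alt Coefficients X
instance (Coefficients : List Int) (X : List Int) (out : Int) : Decidable (Spec_idnum Coefficients X out) := by unfold Spec_idnum; infer_instance

-- ===== CLAIM (what is proved, stated in full; the proofs are below) =====
def Claim_equal_idnum : Prop := ∀ (Coefficients : List Int) (X : List Int), Dom_idnum Coefficients X → Pre_idnum Coefficients X → Spec_idnum Coefficients X (idnum Coefficients X)

-- ===== LEMMAS AND PROOFS =====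

-- Reference mixed-radix value: hor X C = X0 + C0*(X1 + C1*(X2 + …)).
def hor : List Int → List Int → Int
  | [], _ => 0
  | [x], _ => x
  | x :: y :: xs, c :: cs => x + c * hor (y :: xs) cs
  | x :: _ :: _, [] => x

lemma Bbridge (C X : List Int) (hlen : X.length ≤ C.length + 1) :
    ∀ (k s : Nat) (t w : Int), s ≤ X.length → k = X.length - s →
    ((PySem.List.pyRange (s : Int) (X.length : Int) 1).foldl
        (fun tw k =>
          ( tw.1 + PySem.List.pyGetD X k 0 * tw.2,
            if k < (X.length : Int) - 1 then tw.2 * PySem.List.pyGetD C k 0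
            else tw.2 ))
        (t, w)).1
      = t + w * hor (X.drop s) (C.drop s) := by
  intro k
  induction k with
  | zero =>
    intro s t w hs hk
    have hs' : s = X.length := by omega
    subst hs'
    rw [PySem.List.pyRange_one_eq_nil (by omega)]
    simp [hor, List.drop_length]
  | succ k ih =>
    intro s t w hs hk
    have hsn : s < X.length := by omega
    rw [PySem.List.pyRange_one_cons (by exact_mod_cast hsn)]
    rw [List.foldl_cons]
    have hcast : ((s : Int) + 1) = ((s + 1 : Nat) : Int) := by push_cast; ring
    rw [hcast, ih (s+1) _ _ (by omega) (by omega)]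
    simp only [PySem.List.pyGetD_natCast]
    have hXd : X.drop s = X[s] :: X.drop (s+1) := List.drop_eq_getElem_cons hsn
    by_cases hlast : s + 1 = X.length
    · -- last index: drop (s+1) = [], hor ([x]) = x
      rw [if_neg (by push_cast; omega)]
      rw [hXd]
      have : X.drop (s+1) = [] := by rw [hlast]; exact List.drop_length
      rw [this]
      simp [hor, List.getD_eq_getElem?_getD, hsn]
      ring
    · -- middle: condition true
      rw [if_pos (by push_cast; omega)]
      have hsC : s < C.length := by omega
      have hCd : C.drop s = C[s] :: C.drop (s+1) := List.drop_eq_getElem_cons hsC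
      have hXd2 : X.drop (s+1) = X[s+1] :: X.drop (s+2) := List.drop_eq_getElem_cons (by omega)
      rw [hXd, hCd, hXd2]
      simp [hor, List.getD_eq_getElem?_getD, hsn, hsC]
      ring_nf

lemma B_eq_hor (C X : List Int) (hlen : X.length ≤ C.length + 1) :
    idnum_alt C X = hor X C := by
  unfold idnum_alt
  have h := Bbridge C X hlen (X.length) 0 0 1 (by omega) (by omega)
  simpa using h

lemma Abridge (C X : List Int) (hlen : X.length ≤ C.length + 1) :
    ∀ (k s : Nat), 1 ≤ s → s < X.length → k = X.length - s →
    (PySem.List.pyRange (s : Int) (X.length : Int) 1).foldr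
        (fun i acc =>
          if i = (X.length : Int) then
            (PySem.List.pyGetD X i 0) * (PySem.List.pyGetD C (i - 1) 0)
          else if i = 0 then acc + PySem.List.pyGetD X i 0
          else (acc + PySem.List.pyGetD X i 0) * PySem.List.pyGetD C (i - 1) 0) 0
      = C.getD (s - 1) 0 * hor (X.drop s) (C.drop s) := by
  intro k
  induction k with
  | zero => intro s h1 h2 hk; omega
  | succ k ih =>
    intro s h1 h2 hk
    rw [PySem.List.pyRange_one_cons (by exact_mod_cast h2)]
    rw [List.foldr_cons]
    rw [if_neg (by push_cast; omega), if_neg (by push_cast; omega)]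
    have hcastC : ((s : Int) - 1) = ((s - 1 : Nat) : Int) := by push_cast [h1]; ring
    have hcast : ((s : Int) + 1) = ((s + 1 : Nat) : Int) := by push_cast; ring
    rw [hcastC, hcast]
    simp only [PySem.List.pyGetD_natCast]
    have hXd : X.drop s = X[s] :: X.drop (s+1) := List.drop_eq_getElem_cons h2
    by_cases hlast : s + 1 = X.length
    · rw [PySem.List.pyRange_one_eq_nil (by omega)]
      have : X.drop (s+1) = [] := by rw [hlast]; exact List.drop_length
      rw [hXd, this, List.foldr_nil]
      simp [hor, List.getD_eq_getElem?_getD, h2]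
      ring
    · rw [ih (s+1) (by omega) (by omega) (by omega)]
      have hsC : s < C.length := by omega
      have hCd : C.drop s = C[s] :: C.drop (s+1) := List.drop_eq_getElem_cons hsC
      have hXd2 : X.drop (s+1) = X[s+1] :: X.drop (s+2) := List.drop_eq_getElem_cons (by omega)
      rw [hXd, hCd, hXd2]
      simp [hor, List.getD_eq_getElem?_getD, h2, hsC]
      ring_nf

lemma A_eq_hor (C X : List Int) (hlen : X.length ≤ C.length + 1) :
    idnum C X = hor X C := by
  unfold idnum
  match X, hlen with
  | [], _ =>
    rw [show ((([]:List Int).length : Int) - 1) = -1 by simp]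
    rw [PySem.List.pyRange_neg_one_eq_nil (by omega)]
    simp [hor]
  | x :: xs, hlen =>
    rw [PySem.List.pyRange_neg_one_eq_reverse]
    rw [show ((-1 : Int) + 1) = 0 by ring, show (((x::xs).length : Int) - 1 + 1) = ((x::xs).length : Int) by ring]
    rw [List.foldl_reverse]
    rw [PySem.List.pyRange_one_cons (by push_cast [List.length_cons]; omega)]
    rw [List.foldr_cons]
    rw [if_neg (by push_cast [List.length_cons]; omega), if_pos rfl]
    match xs with
    | [] =>
      rw [show ((0:Int) + 1) = (((1:Nat) : Int)) by norm_num]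
      rw [PySem.List.pyRange_one_eq_nil (by simp)]
      simp [hor]
    | y :: ys =>
      rw [show ((0:Int) + 1) = (((1:Nat) : Int)) by norm_num]
      rw [Abridge C (x :: y :: ys) hlen ((x::y::ys).length - 1) 1 (by omega) (by simp) (by omega)]
      match C, hlen with
      | c :: cs, _ =>
        simp [hor]
        ring

-- ===== VERDICT (by name: the statement is the Claim_ definition above) =====
theorem idnum_spec : Claim_equal_idnum := by
  intro C X _ hpre
  unfold Spec_idnum
  rw [A_eq_hor C X hpre, B_eq_hor C X hpre]
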